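-- pv_equiv track=rewrite | github.com/pypi-data/pypi-mirror-375 | packages/langswarm/langswarm-0.0.54.dev26.tar.gz/langswarm-0.0.54.dev26/langswarm/core/detection.py | recommend_tools_for_use_case
-- ===== SOURCE A (Python) =====
-- from typing import Dict, List, Optional, Any, Tuple
--
-- def recommend_tools_for_use_case(use_case: str) -> List[str]:
--     """Recommend tools based on use case description"""
--     recommendations = []
--     use_case_lower = use_case.lower()
--
--     # Simple keyword-based recommendations
--     if any(keyword in use_case_lower for keyword in ["file", "directory", "read", "filesystem"]):
--         recommendations.append("filesystem")
--
--     if any(keyword in use_case_lower for keyword in ["github", "repository", "repo", "git"]):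
--         recommendations.append("github")
--
--     if any(keyword in use_case_lower for keyword in ["form", "input", "configuration", "ui"]):
--         recommendations.append("dynamic_forms")
--
--     if any(keyword in use_case_lower for keyword in ["aws", "s3", "ec2", "lambda"]):
--         recommendations.append("aws")
--
--     if any(keyword in use_case_lower for keyword in ["gcp", "google cloud", "compute engine"]):
--         recommendations.append("gcp")
--
--     if any(keyword in use_case_lower for keyword in ["docker", "container", "containerize"]):
--         recommendations.append("docker")
--
--     return recommendations
-- ===== SOURCE B (Python) =====
-- _KEYWORD_TOOL = [
--     ("file", "filesystem"), ("directory", "filesystem"), ("read", "filesystem"), ("filesystem", "filesystem"),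
--     ("github", "github"), ("repository", "github"), ("repo", "github"), ("git", "github"),
--     ("form", "dynamic_forms"), ("input", "dynamic_forms"), ("configuration", "dynamic_forms"), ("ui", "dynamic_forms"),
--     ("aws", "aws"), ("s3", "aws"), ("ec2", "aws"), ("lambda", "aws"),
--     ("gcp", "gcp"), ("google cloud", "gcp"), ("compute engine", "gcp"),
--     ("docker", "docker"), ("container", "docker"), ("containerize", "docker"),
-- ]
--
-- _TOOL_ORDER = ["filesystem", "github", "dynamic_forms", "aws", "gcp", "docker"]
--
-- def recommend_tools_for_use_case(use_case: str):
--     """Recommend tools by a single left-to-right scan of the text: at each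
--     position, mark the tool of every keyword that starts there, then emit the
--     marked tools in canonical order."""
--     text = use_case.lower()
--     found = set()
--     for i in range(len(text)):
--         for kw, tool in _KEYWORD_TOOL:
--             if tool not in found and text.startswith(kw, i):
--                 found.add(tool)
--     return [t for t in _TOOL_ORDER if t in found]
-- ===== Notes on version B (the rewrite author's own statement) =====
-- stated objective: alternative
-- what changed: Inverts the control flow: instead of six per-tool any()-substring tests, B scans the lowercased text once position by position, marking the tool of every keyword that starts at that position via an inverted keyword->tool table, then emits the marked tools in canonical order.
import Mathlib
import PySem

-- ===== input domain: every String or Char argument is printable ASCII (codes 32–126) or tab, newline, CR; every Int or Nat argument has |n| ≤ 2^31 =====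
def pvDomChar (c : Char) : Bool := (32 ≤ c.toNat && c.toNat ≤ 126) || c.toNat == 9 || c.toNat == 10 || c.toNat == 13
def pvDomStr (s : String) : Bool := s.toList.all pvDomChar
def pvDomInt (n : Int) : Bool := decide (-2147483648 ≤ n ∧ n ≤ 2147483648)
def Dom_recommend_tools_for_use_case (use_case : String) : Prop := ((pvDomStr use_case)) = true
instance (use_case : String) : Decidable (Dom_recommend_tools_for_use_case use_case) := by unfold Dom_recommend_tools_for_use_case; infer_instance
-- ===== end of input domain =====

-- B replaces the six per-tool if/any blocks by a single left-to-right scan of the text that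
-- marks tools at each position (keyword->tool table) and then emits marked tools in canonical order (alternative).


-- ===== PORT A =====
def recommend_tools_for_use_case (use_case : String) : List String :=
  let recommendations : List String := []
  let use_case_lower := PySem.Str.lower use_case
  let recommendations := if ["file", "directory", "read", "filesystem"].any (fun k => PySem.Str.isIn k use_case_lower) then recommendations ++ ["filesystem"] else recommendations
  let recommendations := if ["github", "repository", "repo", "git"].any (fun k => PySem.Str.isIn k use_case_lower) then recommendations ++ ["github"] else recommendations
  let recommendations := if ["form", "input", "configuration", "ui"].any (fun k => PySem.Str.isIn k use_case_lower) then recommendations ++ ["dynamic_forms"] else recommendations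
  let recommendations := if ["aws", "s3", "ec2", "lambda"].any (fun k => PySem.Str.isIn k use_case_lower) then recommendations ++ ["aws"] else recommendations
  let recommendations := if ["gcp", "google cloud", "compute engine"].any (fun k => PySem.Str.isIn k use_case_lower) then recommendations ++ ["gcp"] else recommendations
  let recommendations := if ["docker", "container", "containerize"].any (fun k => PySem.Str.isIn k use_case_lower) then recommendations ++ ["docker"] else recommendations
  recommendations

-- ===== PORT B =====
-- B: keyword -> tool pairs, scanned once per text position
def pvKeywordTool : List (String × String) :=
  [("file", "filesystem"), ("directory", "filesystem"), ("read", "filesystem"), ("filesystem", "filesystem"),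
   ("github", "github"), ("repository", "github"), ("repo", "github"), ("git", "github"),
   ("form", "dynamic_forms"), ("input", "dynamic_forms"), ("configuration", "dynamic_forms"), ("ui", "dynamic_forms"),
   ("aws", "aws"), ("s3", "aws"), ("ec2", "aws"), ("lambda", "aws"),
   ("gcp", "gcp"), ("google cloud", "gcp"), ("compute engine", "gcp"),
   ("docker", "docker"), ("container", "docker"), ("containerize", "docker")]

def pvToolOrder : List String :=
  ["filesystem", "github", "dynamic_forms", "aws", "gcp", "docker"]

-- text.startswith(kw, i) with 0 ≤ i ≤ len(text) is exactly Chars.startswith on (text drop i)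
def recommend_tools_for_use_case_alt (use_case : String) : List String :=
  let text := (PySem.Str.lower use_case).toList
  let found : PySem.Set String :=
    (List.range text.length).foldl
      (fun found i =>
        pvKeywordTool.foldl
          (fun found p =>
            if PySem.Set.contains found p.2 = false ∧
               PySem.Chars.startswith (text.drop i) p.1.toList = true
            then PySem.Set.add found p.2 else found)
          found)
      PySem.Set.empty
  pvToolOrder.filter (fun t => PySem.Set.contains found t)

-- ===== PRECONDITION & SPEC =====
def Spec_recommend_tools_for_use_case (use_case : String) (out : List String) : Prop := out = recommend_tools_for_use_case_alt use_case
instance (use_case : String) (out : List String) : Decidable (Spec_recommend_tools_for_use_case use_case out) := by unfold Spec_recommend_tools_for_use_case; infer_instance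

-- ===== CLAIM =====
def Claim_equal_recommend_tools_for_use_case : Prop := ∀ (use_case : String), Dom_recommend_tools_for_use_case use_case → Spec_recommend_tools_for_use_case use_case (recommend_tools_for_use_case use_case)

-- ===== LEMMAS AND PROOFS =====

-- membership after the inner loop over the keyword table
theorem pv_mem_inner (text : List Char) (i : Nat) (l : List (String × String))
    (found : PySem.Set String) (t : String) :
    t ∈ l.foldl
          (fun found p =>
            if PySem.Set.contains found p.2 = false ∧
               PySem.Chars.startswith (text.drop i) p.1.toList = true
            then PySem.Set.add found p.2 else found)
          found
      ↔ t ∈ found ∨ ∃ p ∈ l, p.2 = t ∧ PySem.Chars.startswith (text.drop i) p.1.toList = true := by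
  induction l generalizing found with
  | nil => simp
  | cons p l ih =>
    simp only [List.foldl_cons, List.mem_cons]
    rw [ih]
    by_cases hc : PySem.Set.contains found p.2 = false ∧
        PySem.Chars.startswith (text.drop i) p.1.toList = true
    · rw [if_pos hc, PySem.Set.mem_add]
      constructor
      · rintro ((h | h) | ⟨q, hq, hqt, hsw⟩)
        · exact Or.inl h
        · exact Or.inr ⟨p, Or.inl rfl, h.symm, hc.2⟩
        · exact Or.inr ⟨q, Or.inr hq, hqt, hsw⟩
      · rintro (h | ⟨q, (rfl | hq), hqt, hsw⟩)
        · exact Or.inl (Or.inl h)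
        · exact Or.inl (Or.inr hqt.symm)
        · exact Or.inr ⟨q, hq, hqt, hsw⟩
    · rw [if_neg hc]
      constructor
      · rintro (h | ⟨q, hq, hqt, hsw⟩)
        · exact Or.inl h
        · exact Or.inr ⟨q, Or.inr hq, hqt, hsw⟩
      · rintro (h | ⟨q, (rfl | hq), hqt, hsw⟩)
        · exact Or.inl h
        · -- the guard failed: either the startswith is false (contradiction) or p.2 is already in found
          rcases Decidable.not_and_iff_or_not.mp hc with h1 | h2
          · have h1' : PySem.Set.contains found q.2 = true := by
              cases hcc : PySem.Set.contains found q.2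
              · exact absurd hcc h1
              · rfl
            subst hqt
            exact Or.inl ((PySem.Set.contains_iff _ _).mp h1')
          · exact absurd hsw h2
        · exact Or.inr ⟨q, hq, hqt, hsw⟩

-- membership after the outer loop over positions 0..n-1
theorem pv_mem_outer (text : List Char) (n : Nat) (found : PySem.Set String) (t : String) :
    t ∈ (List.range n).foldl
          (fun found i =>
            pvKeywordTool.foldl
              (fun found p =>
                if PySem.Set.contains found p.2 = false ∧
                   PySem.Chars.startswith (text.drop i) p.1.toList = true
                then PySem.Set.add found p.2 else found)
              found)
          found
      ↔ t ∈ found ∨ ∃ i < n, ∃ p ∈ pvKeywordTool, p.2 = t ∧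
          PySem.Chars.startswith (text.drop i) p.1.toList = true := by
  induction n generalizing found with
  | zero => simp
  | succ n ih =>
    rw [List.range_succ, List.foldl_append, List.foldl_cons, List.foldl_nil, pv_mem_inner, ih]
    constructor
    · rintro ((h | ⟨i, hi, hp⟩) | ⟨p, hp, hpt, hsw⟩)
      · exact Or.inl h
      · exact Or.inr ⟨i, Nat.lt_succ_of_lt hi, hp⟩
      · exact Or.inr ⟨n, Nat.lt_succ_self n, p, hp, hpt, hsw⟩
    · rintro (h | ⟨i, hi, hp⟩)
      · exact Or.inl (Or.inl h)
      · rcases Nat.lt_succ_iff_lt_or_eq.mp hi with hi' | rfl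
        · exact Or.inl (Or.inr ⟨i, hi', hp⟩)
        · exact Or.inr hp

-- a nonempty keyword occurs as a substring iff it starts at some position < length
theorem pv_exists_pos_iff_isIn (text : List Char) (kw : List Char) (hkw : kw ≠ []) :
    (∃ i < text.length, PySem.Chars.startswith (text.drop i) kw = true)
      ↔ PySem.Chars.isIn kw text = true := by
  rw [← PySem.Chars.exists_prefix_drop_iff_isIn]
  constructor
  · rintro ⟨i, _, h⟩
    exact ⟨i, (PySem.Chars.startswith_iff _ _).mp h⟩
  · rintro ⟨j, hj⟩
    by_cases hlt : j < text.length
    · exact ⟨j, hlt, (PySem.Chars.startswith_iff _ _).mpr hj⟩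
    · exfalso
      rw [List.drop_eq_nil_of_le (Nat.le_of_not_lt hlt)] at hj
      exact hkw (List.prefix_nil.mp hj)

-- the found-set membership, per tool, as a substring condition over that tool's keywords
theorem pv_contains_found (text : List Char) (t : String) :
    PySem.Set.contains
      ((List.range text.length).foldl
        (fun found i =>
          pvKeywordTool.foldl
            (fun found p =>
              if PySem.Set.contains found p.2 = false ∧
                 PySem.Chars.startswith (text.drop i) p.1.toList = true
              then PySem.Set.add found p.2 else found)
            found)
        PySem.Set.empty) t = true
      ↔ ∃ p ∈ pvKeywordTool, p.2 = t ∧ PySem.Chars.isIn p.1.toList text = true := by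
  rw [PySem.Set.contains_iff _ _, pv_mem_outer]
  constructor
  · rintro (h | ⟨i, hi, p, hp, hpt, hsw⟩)
    · simp [PySem.Set.empty] at h
    · refine ⟨p, hp, hpt, ?_⟩
      exact (pv_exists_pos_iff_isIn text p.1.toList (by fin_cases hp <;> decide)).mp ⟨i, hi, hsw⟩
  · rintro ⟨p, hp, hpt, his⟩
    rcases (pv_exists_pos_iff_isIn text p.1.toList (by fin_cases hp <;> decide)).mpr his with ⟨i, hi, hsw⟩
    exact Or.inr ⟨i, hi, p, hp, hpt, hsw⟩

-- ===== VERDICT =====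
theorem recommend_tools_for_use_case_spec : Claim_equal_recommend_tools_for_use_case := by
  intro use_case _
  unfold Spec_recommend_tools_for_use_case recommend_tools_for_use_case recommend_tools_for_use_case_alt
  set text := (PySem.Str.lower use_case).toList with htext
  have key : ∀ t : String,
      PySem.Set.contains
        ((List.range text.length).foldl
          (fun found i =>
            pvKeywordTool.foldl
              (fun found p =>
                if PySem.Set.contains found p.2 = false ∧
                   PySem.Chars.startswith (text.drop i) p.1.toList = true
                then PySem.Set.add found p.2 else found)
              found)
          PySem.Set.empty) t
        = decide (∃ p ∈ pvKeywordTool, p.2 = t ∧ PySem.Chars.isIn p.1.toList text = true) := by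
    intro t
    rcases Bool.eq_false_or_eq_true (PySem.Set.contains _ t) with h | h <;> rw [h]
    · symm; rw [decide_eq_true_eq]
      exact (pv_contains_found text t).mp h
    · symm; rw [decide_eq_false_iff_not]
      intro hx
      have h2 := (pv_contains_found text t).mpr hx
      rw [h] at h2
      exact Bool.false_ne_true h2
  simp only [pvToolOrder, List.filter_cons, List.filter_nil, key]
  simp [pvKeywordTool, PySem.Str.isIn_eq, ← htext]
  split_ifs <;> rfl
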